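-- pv_equiv track=rewrite | github.com/fedebecat/Clothes_Manipulator | MAN_ClothesManipulator/src/utils.py | split_labels
-- ===== SOURCE A (Python) =====
-- def split_labels(label, attr_num):
--     """
--     split the whole one-hot label into separate one-hot labels w.r.t attribute
--     """
--     labels = []
--     start_idx = 0
--     for i in attr_num:
--         sub_labels = label[start_idx:start_idx + i]
--         labels.append(sub_labels)
--         start_idx += i
--     return labels
-- ===== SOURCE B (Python) =====
-- def split_labels(label, attr_num):
--     """
--     split the whole one-hot label into separate one-hot labels w.r.t attribute
--     """
--     bounds = [0]
--     for i in attr_num: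
--         bounds.append(bounds[-1] + i)
--     return [label[a:b] for a, b in zip(bounds, bounds[1:])]
-- ===== Notes on version B (the rewrite author's own statement) =====
-- stated objective: alternative
-- what changed: B precomputes the full table of cumulative boundary indices (prefix sums of attr_num with a leading 0) in one pass, then produces the result by slicing over adjacent boundary pairs, instead of threading a running start index while appending segments.
import Mathlib
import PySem

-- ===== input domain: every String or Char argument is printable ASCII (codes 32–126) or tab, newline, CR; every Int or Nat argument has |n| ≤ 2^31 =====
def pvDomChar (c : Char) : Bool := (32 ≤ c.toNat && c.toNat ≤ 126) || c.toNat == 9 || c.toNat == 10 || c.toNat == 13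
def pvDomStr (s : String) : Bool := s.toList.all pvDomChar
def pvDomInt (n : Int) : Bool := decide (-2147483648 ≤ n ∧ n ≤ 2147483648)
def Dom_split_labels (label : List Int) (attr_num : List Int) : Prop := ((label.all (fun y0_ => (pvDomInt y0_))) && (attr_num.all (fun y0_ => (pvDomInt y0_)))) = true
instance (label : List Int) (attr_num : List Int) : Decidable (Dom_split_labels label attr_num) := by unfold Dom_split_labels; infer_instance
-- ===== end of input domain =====

-- B first builds the full table of cumulative boundary indices, then maps slicing
-- over adjacent boundary pairs — staged passes instead of a loop threading start_idx.

-- ===== PORT A =====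
-- forward loop threading start_idx, appending label[start_idx : start_idx + i]
def split_labels (label : List Int) (attr_num : List Int) : List (List Int) :=
  (attr_num.foldl
    (fun (st : List (List Int) × Int) i =>
      (st.1 ++ [PySem.List.slice label (some st.2) (some (st.2 + i))], st.2 + i))
    ([], 0)).1

-- ===== PORT B =====
-- bounds = prefix sums of attr_num (with leading 0); result = slices over adjacent pairs
def split_labels_alt (label : List Int) (attr_num : List Int) : List (List Int) :=
  let bounds := List.scanl (fun a i => a + i) 0 attr_num
  (bounds.zip bounds.tail).map (fun p => PySem.List.slice label (some p.1) (some p.2))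

-- ===== PRECONDITION & SPEC =====
def Spec_split_labels (label : List Int) (attr_num : List Int) (out : List (List Int)) : Prop := out = split_labels_alt label attr_num
instance (label : List Int) (attr_num : List Int) (out : List (List Int)) : Decidable (Spec_split_labels label attr_num out) := by unfold Spec_split_labels; infer_instance

-- ===== CLAIM =====
def Claim_equal_split_labels : Prop := ∀ (label : List Int) (attr_num : List Int), Dom_split_labels label attr_num → Spec_split_labels label attr_num (split_labels label attr_num)

-- ===== LEMMAS AND PROOFS =====

/-- the segments of `label` delimited by `attr_num`, starting at index `s` -/
def segsFrom (label : List Int) : Int → List Int → List (List Int)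
  | _, [] => []
  | s, i :: r => PySem.List.slice label (some s) (some (s + i)) :: segsFrom label (s + i) r

lemma foldA_eq (label : List Int) (l : List Int) (acc : List (List Int)) (s : Int) :
    (l.foldl
      (fun (st : List (List Int) × Int) i =>
        (st.1 ++ [PySem.List.slice label (some st.2) (some (st.2 + i))], st.2 + i))
      (acc, s)).1 = acc ++ segsFrom label s l := by
  induction l generalizing acc s with
  | nil => simp [segsFrom]
  | cons x r ih => simp [segsFrom, ih]

lemma scanl_zip_eq (label : List Int) (l : List Int) (s : Int) :
    ((List.scanl (fun a i => a + i) s l).zip (List.scanl (fun a i => a + i) s l).tail).map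
        (fun p => PySem.List.slice label (some p.1) (some p.2))
      = segsFrom label s l := by
  induction l generalizing s with
  | nil => simp [segsFrom]
  | cons x r ih =>
    cases r with
    | nil => simp [segsFrom]
    | cons y t =>
      have h := ih (s + x)
      simp only [List.scanl_cons, List.tail_cons, List.zip_cons_cons, List.map_cons,
        segsFrom] at h ⊢
      rw [h]

-- ===== VERDICT =====
theorem split_labels_spec : Claim_equal_split_labels := by
  intro label attr_num _
  unfold Spec_split_labels
  simp only [split_labels, split_labels_alt, foldA_eq, scanl_zip_eq, List.nil_append]
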